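-- pv_equiv track=rewrite | github.com/koyadovic/simple_tetris | main.py | get_bottom_coords_for_collision
-- ===== SOURCE A (Python) =====
-- def get_bottom_coords_for_collision(shape):
--     x_detected = []
--     for y in range(len(shape) - 1, -1, -1):
--         for x in range(len(shape[y])):
--             if x in x_detected:
--                 continue
--             if shape[y][x] == 1:
--                 x_detected.append(x)
--                 yield x, y
-- ===== SOURCE B (Python) =====
-- def has_one_below(shape, y, x):
--     return any(x < len(r) and r[x] == 1 for r in shape[y + 1:])
--
-- def get_bottom_coords_for_collision(shape):
--     for y, row in reversed(list(enumerate(shape))):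
--         for x, cell in enumerate(row):
--             if cell == 1 and not has_one_below(shape, y, x):
--                 yield x, y
-- ===== Notes on version B (the rewrite author's own statement) =====
-- stated objective: alternative
-- what changed: Replaces A's mutable x_detected accumulator and index-range loops by a stateless pass: walk reversed(enumerate(shape)) and emit (x,y) for each filled cell that has no filled cell anywhere below it in the same column (recomputed per cell from the row suffix), instead of tracking already-seen columns.
import Mathlib
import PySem

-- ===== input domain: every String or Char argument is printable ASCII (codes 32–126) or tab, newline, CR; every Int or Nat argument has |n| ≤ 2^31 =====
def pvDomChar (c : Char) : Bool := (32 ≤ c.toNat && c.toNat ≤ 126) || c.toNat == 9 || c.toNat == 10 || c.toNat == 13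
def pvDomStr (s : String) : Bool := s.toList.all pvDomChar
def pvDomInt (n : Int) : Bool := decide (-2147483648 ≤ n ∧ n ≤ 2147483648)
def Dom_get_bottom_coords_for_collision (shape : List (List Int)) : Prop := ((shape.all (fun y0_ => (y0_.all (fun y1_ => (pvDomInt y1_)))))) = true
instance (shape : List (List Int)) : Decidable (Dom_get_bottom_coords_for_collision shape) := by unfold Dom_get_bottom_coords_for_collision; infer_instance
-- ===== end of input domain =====

-- B replaces A's mutable detected-columns list by a stateless per-cell "no filled cell below in this column" test; objective: alternative (same results, different decomposition).

-- ===== PORT A =====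
def get_bottom_coords_for_collision (shape : List (List Int)) : List (Int × Int) :=
  ((PySem.List.pyRange ((shape.length : Int) - 1) (-1) (-1)).foldl
    (fun (st : List Int × List (Int × Int)) y =>
      let row := PySem.List.pyGetD shape y []
      (PySem.List.pyRange 0 (row.length : Int) 1).foldl
        (fun st x =>
          if x ∈ st.1 then st
          else if PySem.List.pyGetD row x 0 = 1 then (st.1 ++ [x], st.2 ++ [(x, y)])
          else st) st)
    ([], [])).2

-- ===== PORT B =====
def has_one_below (shape : List (List Int)) (y : Int) (x : Int) : Bool :=
  (PySem.List.slice shape (some (y + 1)) none).any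
    (fun r => decide (x < (r.length : Int)) && (PySem.List.pyGetD r x 0 == 1))

def get_bottom_coords_for_collision_alt (shape : List (List Int)) : List (Int × Int) :=
  (PySem.List.enumerate shape 0).reverse.flatMap
    (fun yr =>
      (PySem.List.enumerate yr.2 0).filterMap
        (fun xc => if xc.2 = 1 ∧ has_one_below shape yr.1 xc.1 = false then some (xc.1, yr.1) else none))

-- ===== PRECONDITION & SPEC =====
def Spec_get_bottom_coords_for_collision (shape : List (List Int)) (out : List (Int × Int)) : Prop := out = get_bottom_coords_for_collision_alt shape
instance (shape : List (List Int)) (out : List (Int × Int)) : Decidable (Spec_get_bottom_coords_for_collision shape out) := by unfold Spec_get_bottom_coords_for_collision; infer_instance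

-- ===== CLAIM (what is proved, stated in full; the proofs are below) =====
def Claim_equal_get_bottom_coords_for_collision : Prop := ∀ (shape : List (List Int)), Dom_get_bottom_coords_for_collision shape → Spec_get_bottom_coords_for_collision shape (get_bottom_coords_for_collision shape)

-- ===== LEMMAS AND PROOFS =====

-- "column x has a filled cell in some row with index ≥ k"
def hitFrom (shape : List (List Int)) (k : Nat) (x : Int) : Bool :=
  (shape.drop k).any (fun r => decide (x < (r.length : Int)) && (PySem.List.pyGetD r x 0 == 1))

-- the pairs B emits for row index y
def rowOut (shape : List (List Int)) (y : Int) : List (Int × Int) :=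
  (PySem.List.enumerate (PySem.List.pyGetD shape y []) 0).filterMap
    (fun xc => if xc.2 = 1 ∧ has_one_below shape y xc.1 = false then some (xc.1, y) else none)

-- A's inner loop body and row step
def stepA (shape : List (List Int)) (st : List Int × List (Int × Int)) (y : Int) :
    List Int × List (Int × Int) :=
  (PySem.List.pyRange 0 ((PySem.List.pyGetD shape y []).length : Int) 1).foldl
    (fun st x =>
      if x ∈ st.1 then st
      else if PySem.List.pyGetD (PySem.List.pyGetD shape y []) x 0 = 1 then (st.1 ++ [x], st.2 ++ [(x, y)])
      else st) st

theorem innerAux (row : List Int) (y : Int) (P : Int → Bool) :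
    ∀ (m a : Nat), a + m = row.length → ∀ (d : List Int) (out : List (Int × Int)),
    (∀ x : Int, (a : Int) ≤ x → (x ∈ d ↔ P x = true)) →
    (PySem.List.pyRange (a : Int) (row.length : Int) 1).foldl
      (fun st x =>
        if x ∈ st.1 then st
        else if PySem.List.pyGetD row x 0 = 1 then (st.1 ++ [x], st.2 ++ [(x, y)])
        else st) (d, out)
    = (d ++ (PySem.List.pyRange (a : Int) (row.length : Int) 1).filterMap
          (fun x => if PySem.List.pyGetD row x 0 = 1 ∧ P x = false then some x else none),
       out ++ (PySem.List.pyRange (a : Int) (row.length : Int) 1).filterMap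
          (fun x => if PySem.List.pyGetD row x 0 = 1 ∧ P x = false then some (x, y) else none)) := by
  intro m
  induction m with
  | zero =>
    intro a ha d out _
    rw [PySem.List.pyRange_one_eq_nil (by omega : (row.length : Int) ≤ (a : Int))]
    simp
  | succ m ih =>
    intro a ha d out hd
    have hlt : (a : Int) < (row.length : Int) := by omega
    rw [PySem.List.pyRange_one_cons hlt]
    have hstep : ((a : Int) + 1) = ((a + 1 : Nat) : Int) := by push_cast; ring
    have hmem : ((a : Int) ∈ d) ↔ P (a : Int) = true := hd _ le_rfl
    by_cases hP : P (a : Int) = true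
    · -- already detected: skip
      simp only [List.foldl_cons, List.filterMap_cons]
      rw [if_pos (hmem.mpr hP),
        if_neg (fun h => by simp [hP] at h),
        if_neg (fun h => by simp [hP] at h), hstep, ih (a + 1) (by omega) d out (fun x hx => hd x (by push_cast at hx ⊢; omega))]
    · have hPn : P (a : Int) = false := by simpa using hP
      have hnotmem : ¬ ((a : Int) ∈ d) := fun h => hP (hmem.mp h)
      by_cases hcell : PySem.List.pyGetD row (a : Int) 0 = 1
      · -- fresh hit: append
        simp only [List.foldl_cons, List.filterMap_cons]
        rw [if_neg hnotmem, if_pos hcell, if_pos ⟨hcell, hPn⟩, if_pos ⟨hcell, hPn⟩, hstep,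
          ih (a + 1) (by omega) (d ++ [(a : Int)]) (out ++ [((a : Int), y)])
            (fun x hx => by
              have hne : x ≠ (a : Int) := by push_cast at hx; omega
              have := hd x (by push_cast at hx ⊢; omega)
              simp [List.mem_append, hne, this])]
        simp
      · -- empty cell: skip
        simp only [List.foldl_cons, List.filterMap_cons]
        rw [if_neg hnotmem, if_neg hcell, if_neg (fun h => hcell h.1),
          if_neg (fun h => hcell h.1), hstep, ih (a + 1) (by omega) d out (fun x hx => hd x (by push_cast at hx ⊢; omega))]

theorem has_one_below_eq_hitFrom (shape : List (List Int)) (k : Nat) (x : Int) :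
    has_one_below shape (k : Int) x = hitFrom shape (k + 1) x := by
  unfold has_one_below hitFrom
  have : ((k : Int) + 1) = (((k + 1 : Nat)) : Int) := by push_cast; ring
  rw [this, PySem.List.slice_from_natCast]

theorem stepA_eq (shape : List (List Int)) (k : Nat) (hk : k < shape.length)
    (d : List Int) (out : List (Int × Int))
    (hd : ∀ x : Int, 0 ≤ x → (x ∈ d ↔ hitFrom shape (k + 1) x = true)) :
    ∃ d', stepA shape (d, out) (k : Int) = (d', out ++ rowOut shape (k : Int)) ∧
      (∀ x : Int, 0 ≤ x → (x ∈ d' ↔ hitFrom shape k x = true)) := by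
  unfold stepA rowOut
  set row := PySem.List.pyGetD shape (k : Int) [] with hrow
  have hrowget : row = shape.getD k [] := by
    rw [hrow, PySem.List.pyGetD_natCast]
  set P : Int → Bool := fun x => has_one_below shape (k : Int) x with hP
  have hPd : ∀ x : Int, 0 ≤ x → (x ∈ d ↔ P x = true) := by
    intro x hx
    rw [hP]
    simp only [has_one_below_eq_hitFrom]
    exact hd x hx
  -- the inner fold, characterized
  have hinner := innerAux row (k : Int) P row.length 0 (by omega) d out
    (fun x hx => hPd x (by exact_mod_cast hx))
  simp only [Nat.cast_zero] at hinner
  rw [hinner]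
  refine ⟨d ++ (PySem.List.pyRange 0 (row.length : Int) 1).filterMap
      (fun x => if PySem.List.pyGetD row x 0 = 1 ∧ P x = false then some x else none), ?_, ?_⟩
  · -- outputs agree: B's enumerate-filterMap = A's range-filterMap
    congr 1
    rw [PySem.List.enumerate_eq_map_pyRange row 0, List.filterMap_map, PySem.List.len_eq]
    rfl
  · -- detected-set characterization after this row
    intro x hx
    have hdrop : shape.drop k = row :: shape.drop (k + 1) := by
      rw [hrowget, List.getD_eq_getElem _ _ hk]
      exact List.drop_eq_getElem_cons hk
    constructor
    · intro hmem
      rcases List.mem_append.mp hmem with h | h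
      · have := (hd x hx).mp h
        unfold hitFrom at this ⊢
        rw [hdrop]
        simp only [List.any_cons, Bool.or_eq_true]
        exact Or.inr this
      · rcases List.mem_filterMap.mp h with ⟨x', hx', hval⟩
        have hxeq : x' = x ∧ PySem.List.pyGetD row x' 0 = 1 := by
          by_cases hc : PySem.List.pyGetD row x' 0 = 1 ∧ P x' = false
          · rw [if_pos hc] at hval
            exact ⟨Option.some.inj hval, hc.1⟩
          · rw [if_neg hc] at hval; cases hval
        rcases hxeq with ⟨rfl, hcell⟩
        have hxrange := (PySem.List.mem_pyRange_one).mp hx'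
        unfold hitFrom
        rw [hdrop]
        simp only [List.any_cons, Bool.or_eq_true]
        left
        simp only [Bool.and_eq_true, decide_eq_true_eq, beq_iff_eq]
        exact ⟨hxrange.2, hcell⟩
    · intro hhit
      unfold hitFrom at hhit
      rw [hdrop] at hhit
      simp only [List.any_cons, Bool.or_eq_true] at hhit
      rcases hhit with h | h
      · -- hit in this row
        simp only [Bool.and_eq_true, decide_eq_true_eq, beq_iff_eq] at h
        by_cases hPx : P x = true
        · exact List.mem_append.mpr (Or.inl ((hPd x hx).mpr hPx))
        · have hPf : P x = false := by simpa using hPx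
          refine List.mem_append.mpr (Or.inr (List.mem_filterMap.mpr ⟨x, ?_, ?_⟩))
          · exact PySem.List.mem_pyRange_one.mpr ⟨hx, h.1⟩
          · rw [if_pos ⟨h.2, hPf⟩]
      · exact List.mem_append.mpr (Or.inl ((hd x hx).mpr (by unfold hitFrom; exact h)))

theorem outerAux (shape : List (List Int)) :
    ∀ (k : Nat), k ≤ shape.length → ∀ (d : List Int) (out : List (Int × Int)),
    (∀ x : Int, 0 ≤ x → (x ∈ d ↔ hitFrom shape k x = true)) →
    ((PySem.List.pyRange 0 (k : Int) 1).reverse.foldl (stepA shape) (d, out)).2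
    = out ++ (PySem.List.pyRange 0 (k : Int) 1).reverse.flatMap (fun y => rowOut shape y) := by
  intro k
  induction k with
  | zero =>
    intro _ d out _
    simp
  | succ k ih =>
    intro hk d out hd
    have hsplit : PySem.List.pyRange 0 ((k + 1 : Nat) : Int) 1
        = PySem.List.pyRange 0 (k : Int) 1 ++ [(k : Int)] := by
      have : ((k + 1 : Nat) : Int) = (k : Int) + 1 := by push_cast; ring
      rw [this, PySem.List.pyRange_one_succ_right (by omega)]
    rw [hsplit, List.reverse_append]
    simp only [List.reverse_singleton, List.singleton_append, List.foldl_cons, List.flatMap_cons]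
    rcases stepA_eq shape k (by omega) d out hd with ⟨d', hstep, hd'⟩
    rw [hstep, ih (by omega) d' (out ++ rowOut shape (k : Int)) hd']
    simp

theorem get_bottom_coords_for_collision_eq_alt (shape : List (List Int)) :
    get_bottom_coords_for_collision shape = get_bottom_coords_for_collision_alt shape := by
  unfold get_bottom_coords_for_collision get_bottom_coords_for_collision_alt
  have hrange : PySem.List.pyRange ((shape.length : Int) - 1) (-1) (-1)
      = (PySem.List.pyRange 0 (shape.length : Int) 1).reverse := by
    rw [PySem.List.pyRange_neg_one_eq_reverse]
    norm_num
  rw [hrange]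
  have houter := outerAux shape shape.length le_rfl [] []
    (by intro x _; unfold hitFrom; simp)
  have hfold : ((PySem.List.pyRange 0 ((shape.length : Nat) : Int) 1).reverse.foldl (stepA shape) ([], [])).2
      = (PySem.List.pyRange 0 ((shape.length : Nat) : Int) 1).reverse.flatMap (fun y => rowOut shape y) := by
    rw [houter]; simp
  have hstepA : ∀ (st : List Int × List (Int × Int)) (y : Int),
      (fun (st : List Int × List (Int × Int)) y =>
        let row := PySem.List.pyGetD shape y []
        (PySem.List.pyRange 0 (row.length : Int) 1).foldl
          (fun st x =>
            if x ∈ st.1 then st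
            else if PySem.List.pyGetD row x 0 = 1 then (st.1 ++ [x], st.2 ++ [(x, y)])
            else st) st) st y = stepA shape st y := fun _ _ => rfl
  simp only [hstepA]
  rw [hfold]
  -- relate B's reversed-enumerate flatMap to the rowOut flatMap
  rw [PySem.List.enumerate_eq_map_pyRange (d := []), ← List.map_reverse, List.flatMap_map]
  rfl

-- ===== VERDICT (by name: the statement is the Claim_ definition above) =====
theorem get_bottom_coords_for_collision_spec : Claim_equal_get_bottom_coords_for_collision := by
  intro shape _
  unfold Spec_get_bottom_coords_for_collision
  exact get_bottom_coords_for_collision_eq_alt shape
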